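-- pv_equiv track=rewrite | github.com/jaohoeppers/Linguagens_Formais_e_Automatos | py.py | automato
-- ===== SOURCE A (Python) =====
-- def automato(string):
--     pilha=[]
--     i=0
--
--     while i <len(string) and string[i] in ("a","b"):
--         pilha.append(string[i])
--         i+=1
--
--     if string[i]=='X':
--         i+=1
--     else:
--         return "Cadeia nao reconhecida"
--
--     while i < len(string) and pilha:
--         if string[i]==pilha[-1]:
--             pilha.pop()
--             i+=1
--         else:
--             return "Cadeia nao reconhecida"
--
--     return 'cadeia reconhecida'
-- ===== SOURCE B (Python) =====
-- def automato(string):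
--     i = 0
--     while i < len(string) and string[i] in ("a", "b"):
--         i += 1
--     if string[i] != 'X':
--         return "Cadeia nao reconhecida"
--     prefix = string[:i]
--     rest = string[i + 1:]
--     m = min(len(prefix), len(rest))
--     if rest[:m] == prefix[::-1][:m]:
--         return 'cadeia reconhecida'
--     return "Cadeia nao reconhecida"
-- ===== Notes on version B (the rewrite author's own statement) =====
-- stated objective: simpler
-- what changed: B drops A's stack and second pop-and-compare loop: it counts the leading run of 'a'/'b', then decides acceptance with a single slice comparison rest[:m] == prefix[::-1][:m] with m = min(len(prefix), len(rest)).
-- outside the precondition, e.g. on automato('a'): A raises IndexError, B raises IndexError; on automato(''): A raises IndexError, B raises IndexError; on automato('b'): A raises IndexError, B raises IndexError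
import Mathlib
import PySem

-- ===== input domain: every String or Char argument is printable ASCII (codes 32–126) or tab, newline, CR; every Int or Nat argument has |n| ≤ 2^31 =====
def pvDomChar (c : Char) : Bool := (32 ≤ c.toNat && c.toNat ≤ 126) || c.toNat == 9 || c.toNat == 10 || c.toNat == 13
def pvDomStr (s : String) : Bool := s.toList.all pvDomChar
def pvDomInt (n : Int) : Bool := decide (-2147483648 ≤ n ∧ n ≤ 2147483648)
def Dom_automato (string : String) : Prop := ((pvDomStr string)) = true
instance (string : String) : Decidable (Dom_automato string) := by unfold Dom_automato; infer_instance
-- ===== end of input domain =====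

-- B replaces A's incremental stack pop-and-compare loop by one slice comparison:
-- rest[:m] == prefix[::-1][:m] with m = min(len(prefix), len(rest)); objective: simpler.

-- ===== PORT A =====
-- first while loop: pilha.append / i += 1, state (pilha, remaining suffix of the string)
def automatoScan (pilha rest : List Char) : List Char × List Char :=
  match rest with
  | [] => (pilha, [])
  | c :: t => if c = 'a' ∨ c = 'b' then automatoScan (c :: pilha) t else (pilha, c :: t)

-- second while loop: compare string[i] with pilha[-1] (= head of the cons stack), pop, advance
def automatoLoop (pilha rest : List Char) : String :=
  match rest, pilha with
  | [], _ => "cadeia reconhecida"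
  | _ :: _, [] => "cadeia reconhecida"
  | c :: t, h :: hs =>
      if c = h then automatoLoop hs t else "Cadeia nao reconhecida"

def automato (string : String) : String :=
  let r := automatoScan [] string.toList
  match r.2 with
  | [] => ""      -- Python raises IndexError on string[i] here (i = len); excluded by Pre_
  | c :: tail => if c = 'X' then automatoLoop r.1 tail else "Cadeia nao reconhecida"

-- ===== PORT B =====
-- B's while loop computing i, the length of the leading run of 'a'/'b'
def altCount (cs : List Char) : Nat :=
  match cs with
  | [] => 0
  | c :: t => if c = 'a' ∨ c = 'b' then 1 + altCount t else 0

def automato_alt (string : String) : String :=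
  let cs := string.toList
  let i := altCount cs
  match cs[i]? with
  | none => ""    -- Python raises IndexError on string[i] here; excluded by Pre_
  | some c =>
    if c ≠ 'X' then "Cadeia nao reconhecida"
    else
      -- slices string[:i], string[i+1:], [::-1], [:m] with nonnegative bounds = take/drop/reverse
      let pref := cs.take i
      let rest := cs.drop (i + 1)
      let m := min pref.length rest.length
      if rest.take m = pref.reverse.take m then "cadeia reconhecida"
      else "Cadeia nao reconhecida"

-- ===== PRECONDITION & SPEC =====
-- Pre_ excludes exactly the inputs on which Python A raises IndexError: strings whose
-- characters are all 'a'/'b' (including ""), where string[i] is read at i = len(string).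
def Pre_automato (string : String) : Prop :=
  (string.toList.any (fun c => !(c = 'a' || c = 'b'))) = true
instance (string : String) : Decidable (Pre_automato string) := by unfold Pre_automato; infer_instance

def pvWitness_automato : String := "abXba"

def Spec_automato (string : String) (out : String) : Prop := out = automato_alt string
instance (string : String) (out : String) : Decidable (Spec_automato string out) := by unfold Spec_automato; infer_instance

-- ===== CLAIM (what is proved, stated in full; the proofs are below) =====
def Claim_equal_automato : Prop := ∀ (string : String), Dom_automato string → Pre_automato string → Spec_automato string (automato string)

-- ===== LEMMAS AND PROOFS =====

theorem automatoScan_eq (pilha rest : List Char) :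
    automatoScan pilha rest =
      ((rest.takeWhile (fun c => c = 'a' ∨ c = 'b')).reverse ++ pilha,
        rest.dropWhile (fun c => c = 'a' ∨ c = 'b')) := by
  induction rest generalizing pilha with
  | nil => simp [automatoScan]
  | cons c t ih =>
    by_cases h : c = 'a' ∨ c = 'b' <;>
      simp [automatoScan, h, ih]

theorem altCount_eq (cs : List Char) :
    altCount cs = (cs.takeWhile (fun c => c = 'a' ∨ c = 'b')).length := by
  induction cs with
  | nil => simp [altCount]
  | cons c t ih =>
    by_cases h : c = 'a' ∨ c = 'b' <;>
      simp [altCount, h, ih, Nat.add_comm]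

theorem automatoLoop_eq (rest pilha : List Char) :
    automatoLoop pilha rest =
      (if rest.take (min pilha.length rest.length) = pilha.take (min pilha.length rest.length)
       then "cadeia reconhecida" else "Cadeia nao reconhecida") := by
  induction rest generalizing pilha with
  | nil => simp [automatoLoop]
  | cons c t ih =>
    cases pilha with
    | nil => simp [automatoLoop]
    | cons h hs =>
      by_cases hc : c = h
      · subst hc
        have hm : min (hs.length + 1) (t.length + 1) = min hs.length t.length + 1 := by omega
        rw [automatoLoop, if_pos rfl, ih hs]
        simp [hm, List.take_succ_cons]
      · have hm : min (hs.length + 1) (t.length + 1) = min hs.length t.length + 1 := by omega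
        rw [automatoLoop, if_neg hc]
        simp [hm, List.take_succ_cons, hc]

-- ===== VERDICT (by name: the statement is the Claim_ definition above) =====
theorem automato_spec : Claim_equal_automato := by
  intro string _ hpre
  unfold Spec_automato automato automato_alt
  dsimp only
  have hsplit : string.toList.takeWhile (fun c => c = 'a' ∨ c = 'b') ++ string.toList.dropWhile (fun c => c = 'a' ∨ c = 'b') = string.toList :=
    List.takeWhile_append_dropWhile
  have hne : string.toList.dropWhile (fun c => c = 'a' ∨ c = 'b') ≠ [] := by
    intro h
    unfold Pre_automato at hpre
    rw [List.any_eq_true] at hpre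
    obtain ⟨c, hc, hb⟩ := hpre
    simp at hb
    have hall := List.dropWhile_eq_nil_iff.mp h
    have := hall c (by simpa using hc)
    simp at this
    tauto
  obtain ⟨c, tail, hct⟩ := List.exists_cons_of_ne_nil hne
  have htake : string.toList.take (string.toList.takeWhile (fun c => c = 'a' ∨ c = 'b')).length
      = string.toList.takeWhile (fun c => c = 'a' ∨ c = 'b') := by
    have h := List.take_left (l₁ := string.toList.takeWhile (fun c => c = 'a' ∨ c = 'b'))
      (l₂ := string.toList.dropWhile (fun c => c = 'a' ∨ c = 'b'))
    rwa [hsplit] at h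
  have hdroppre : string.toList.drop (string.toList.takeWhile (fun c => c = 'a' ∨ c = 'b')).length
      = string.toList.dropWhile (fun c => c = 'a' ∨ c = 'b') := by
    have h := List.drop_left (l₁ := string.toList.takeWhile (fun c => c = 'a' ∨ c = 'b'))
      (l₂ := string.toList.dropWhile (fun c => c = 'a' ∨ c = 'b'))
    rwa [hsplit] at h
  have hget : string.toList[(string.toList.takeWhile (fun c => c = 'a' ∨ c = 'b')).length]? = some c := by
    have h0 : (string.toList.drop (string.toList.takeWhile (fun c => c = 'a' ∨ c = 'b')).length)[0]? = some c := by
      rw [hdroppre, hct]; rfl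
    rw [List.getElem?_drop] at h0
    simpa using h0
  have hdrop : string.toList.drop ((string.toList.takeWhile (fun c => c = 'a' ∨ c = 'b')).length + 1) = tail := by
    have h1 := congrArg (List.drop 1) hdroppre
    rw [List.drop_drop, hct] at h1
    simpa [Nat.add_comm] using h1
  rw [automatoScan_eq, altCount_eq, hct, hget]
  dsimp only
  by_cases hX : c = 'X'
  · rw [if_pos hX, if_neg (by simp [hX])]
    rw [automatoLoop_eq, htake, hdrop]
    simp
  · rw [if_neg hX, if_pos (by simpa using hX)]
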